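-- pv_equiv track=rewrite | github.com/alexm720/Rushhour-Best-Path | RH.py | AutoCount
-- ===== SOURCE A (Python) =====
-- def AutoCount(StateSpace):
--     CarDict = {}
--     for line in range(0,len(StateSpace)): # For loop goes through each list inside the main list
--         for char in StateSpace[line]:     # and goes character by character.
--             if(char == '-'):              # If the character is empty, nothing happens
--                 continue
--             else:                         # If the character is not empty check if the character is already in
--                 temp = char               # the dictionary
--                 if temp not in CarDict:
--                     if StateSpace[line].count(temp) >= 2:    # If the character is not in the dictionary, check if the length of that characters occurance
--                         CarDict[temp] = "H"                  # is greater than or equal to two, this would indicate the car is horizontal if true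
--                     elif StateSpace[line].count(temp) == 1:  # If the character occurance length is one, then this indcates that the car is vertical
--                         CarDict[temp] = "V"
--     return CarDict
-- ===== SOURCE B (Python) =====
-- def AutoCount(StateSpace):
--     # Stage 1: ordered list of distinct car chars, in first-appearance (row-major) order.
--     cars = list(dict.fromkeys(ch for row in StateSpace for ch in row if ch != '-'))
--     # Stage 2: per car, search for its first row and classify there.
--     out = {}
--     for c in cars:
--         row = next(r for r in StateSpace if c in r)
--         out[c] = 'H' if row.count(c) >= 2 else 'V'
--     return out
-- ===== Notes on version B (the rewrite author's own statement) =====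
-- stated objective: alternative
-- what changed: B inverts the loop structure: instead of A's single row-major grid scan that classifies each char on first sight with an in-row rescan, B first collects the ordered distinct car chars (dict.fromkeys over the flattened grid) and then, iterating over that key list rather than the grid, searches for each car's first row and classifies it there.
import Mathlib
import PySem

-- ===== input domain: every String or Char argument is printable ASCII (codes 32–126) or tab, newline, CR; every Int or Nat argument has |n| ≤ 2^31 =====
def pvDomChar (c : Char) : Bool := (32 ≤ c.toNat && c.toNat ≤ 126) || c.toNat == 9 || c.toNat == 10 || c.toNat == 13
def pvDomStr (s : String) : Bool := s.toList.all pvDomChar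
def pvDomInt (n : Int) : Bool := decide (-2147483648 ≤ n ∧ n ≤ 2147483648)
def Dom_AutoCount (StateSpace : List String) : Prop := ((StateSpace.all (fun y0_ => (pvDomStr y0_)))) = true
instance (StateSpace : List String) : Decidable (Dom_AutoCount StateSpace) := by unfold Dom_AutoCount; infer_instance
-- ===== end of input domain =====

-- B inverts the loop structure: it first collects the ordered distinct car chars, then iterates
-- over that key list (not the grid), searching for each car's first row and classifying it there
-- (objective: alternative; same asymptotic cost).

-- ===== PORT A =====
-- inner loop body of A, kept as a named helper (verbatim the Python loop body)
def AutoCountStepA (row : String) (CarDict : PySem.Dict String String) (char : Char) :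
    PySem.Dict String String :=
  if char == '-' then CarDict
  else
    let temp := String.ofList [char]
    if CarDict.contains temp then CarDict
    else if 2 ≤ PySem.Str.count row temp then CarDict.insert temp "H"
    else if PySem.Str.count row temp = 1 then CarDict.insert temp "V"
    else CarDict

def AutoCount (StateSpace : List String) : List (String × String) :=
  ((PySem.List.pyRange 0 (StateSpace.length : Int) 1).foldl
    (fun CarDict line =>
      (PySem.List.pyGetD StateSpace line "").toList.foldl
        (AutoCountStepA (PySem.List.pyGetD StateSpace line "")) CarDict)
    PySem.Dict.empty).items

-- ===== PORT B =====
-- loop body of Source B's stage-2 loop, verbatim ('next(r for r in StateSpace if c in r)' is the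
-- first row containing c; it always exists since c came from some row, so .getD "" is never used)
def AutoCountStepB (StateSpace : List String) (out : PySem.Dict String String) (ch : Char) :
    PySem.Dict String String :=
  let c := String.ofList [ch]
  let row := (StateSpace.find? (fun r => PySem.Str.isIn c r)).getD ""
  out.insert c (if 2 ≤ PySem.Str.count row c then "H" else "V")

def AutoCount_alt (StateSpace : List String) : List (String × String) :=
  -- stage 1: dict.fromkeys over the flattened grid = ordered dedup (PySem.List.dedup)
  let cars := PySem.List.dedup
    (StateSpace.flatMap (fun row => row.toList.filter (fun ch => ch != '-')))
  -- stage 2: loop over the key list, not the grid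
  (cars.foldl (AutoCountStepB StateSpace) PySem.Dict.empty).items

-- ===== PRECONDITION & SPEC =====
def Spec_AutoCount (StateSpace : List String) (out : List (String × String)) : Prop := out = AutoCount_alt StateSpace
instance (StateSpace : List String) (out : List (String × String)) : Decidable (Spec_AutoCount StateSpace out) := by unfold Spec_AutoCount; infer_instance

-- ===== CLAIM (what is proved, stated in full; the proofs are below) =====
def Claim_equal_AutoCount : Prop := ∀ (StateSpace : List String), Dom_AutoCount StateSpace → Spec_AutoCount StateSpace (AutoCount StateSpace)

-- ===== LEMMAS AND PROOFS =====

-- the value B assigns to car char ch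
def pvVal (ss : List String) (ch : Char) : String :=
  if 2 ≤ PySem.Str.count ((ss.find? (fun r => PySem.Str.isIn (String.ofList [ch]) r)).getD "")
        (String.ofList [ch]) then "H" else "V"

-- occurrences in a char list whose singleton string is the key k
def pvCnt (l : List Char) (k : String) : Nat := l.countP (fun c => String.ofList [c] == k)

lemma pvKeyEq (x c : Char) : (String.ofList [x] == String.ofList [c]) = (x == c) := by
  rcases eq_or_ne x c with h | h
  · simp [h]
  · simp [h, String.ofList_inj]

lemma pvCountGo_singleton (c : Char) :
    ∀ (fuel : Nat) (l : List Char) (acc : Nat), l.length ≤ fuel →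
      PySem.Chars.count.go [c] fuel l acc = acc + l.count c := by
  intro fuel
  induction fuel with
  | zero =>
      intro l acc hl
      have : l = [] := List.eq_nil_of_length_eq_zero (by omega)
      subst this
      rw [PySem.Chars.count.go]
      simp
  | succ fuel ih =>
      intro l acc hl
      cases l with
      | nil =>
          rw [PySem.Chars.count.go]
          simp
          omega
      | cons h t =>
          rw [PySem.Chars.count.go]
          have hpre : [c].isPrefixOf (h :: t) = (c == h) := by
            simp [List.isPrefixOf]
          rw [hpre]
          have hlen : t.length ≤ fuel := by
            simp only [List.length_cons] at hl
            omega
          by_cases hc : c = h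
          · subst hc
            simp only [beq_self_eq_true, if_true, List.length_cons, List.length_nil,
              List.drop_succ_cons, List.drop_zero]
            rw [ih t (acc + 1) hlen]
            simp only [List.count_cons, beq_self_eq_true, if_true]
            omega
          · have hb : (c == h) = false := by simp [hc]
            rw [hb]
            simp only [Bool.false_eq_true, if_false]
            rw [ih t acc hlen]
            simp [List.count_cons]
            exact fun hh => hc hh.symm

lemma pvCount_singleton (l : List Char) (c : Char) : PySem.Chars.count l [c] = l.count c := by
  unfold PySem.Chars.count
  simp only [List.isEmpty_cons, if_false, Bool.false_eq_true]
  simpa using pvCountGo_singleton c l.length l 0 le_rfl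

lemma pvStrCount_key (row : String) (c : Char) :
    PySem.Str.count row (String.ofList [c]) = pvCnt row.toList (String.ofList [c]) := by
  rw [PySem.Str.count_eq]
  have h1 : (String.ofList [c]).toList = [c] := by simp
  rw [h1, pvCount_singleton, pvCnt]
  rw [List.count_eq_countP]
  apply List.countP_congr
  intro a _
  rw [pvKeyEq]

-- 'c in r' for a singleton string is char membership
lemma pvIsIn_singleton (c : Char) (r : String) :
    PySem.Str.isIn (String.ofList [c]) r = r.toList.contains c := by
  have hiff : PySem.Str.isIn (String.ofList [c]) r = true ↔ c ∈ r.toList := by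
    rw [PySem.Str.isIn_iff_infix]
    simp only [String.toList_ofList]
    constructor
    · intro ht
      exact ht.subset (by simp)
    · intro h
      obtain ⟨s, t, hst⟩ := List.append_of_mem h
      exact ⟨s, t, by simp [hst]⟩
  by_cases h : c ∈ r.toList
  · rw [hiff.mpr h]
    simp [h]
  · have hf : PySem.Str.isIn (String.ofList [c]) r = false := by
      rw [← Bool.not_eq_true]
      exact fun ht => h (hiff.mp ht)
    rw [hf]
    simp [h]

-- invariant for A's scan: after the cells 'done' are processed, A's dict lists the distinct
-- car chars of 'done' in order, each mapped to B's value
def AInv (ss : List String) (done : List Char) (d : PySem.Dict String String) : Prop :=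
  d.items = (PySem.List.dedup (done.filter (fun ch => ch != '-'))).map
      (fun ch => (String.ofList [ch], pvVal ss ch))
  ∧ d.keys.Nodup
  ∧ ∀ ch : Char, ch ≠ '-' → (d.contains (String.ofList [ch]) = true ↔ ch ∈ done)

lemma pvDedup_append_mem {l : List Char} {x : Char} (hx : x ∈ l) :
    PySem.List.dedup (l ++ [x]) = PySem.List.dedup l := by
  simp only [PySem.List.dedup_eq_ofList, PySem.Set.ofList_eq_foldl, List.foldl_append,
    List.foldl_cons, List.foldl_nil]
  rw [← PySem.Set.ofList_eq_foldl, PySem.Set.add]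
  rw [if_pos]
  rw [PySem.Set.contains_iff]
  simpa using hx

lemma pvDedup_append_not_mem {l : List Char} {x : Char} (hx : x ∉ l) :
    PySem.List.dedup (l ++ [x]) = PySem.List.dedup l ++ [x] := by
  simp only [PySem.List.dedup_eq_ofList, PySem.Set.ofList_eq_foldl, List.foldl_append,
    List.foldl_cons, List.foldl_nil]
  rw [← PySem.Set.ofList_eq_foldl, PySem.Set.add]
  rw [if_neg]
  simp only [PySem.Set.contains_iff, PySem.Set.mem_ofList]
  exact fun h => hx (by simpa using h)

-- one step of A preserves the invariant, given that 'done' is exactly the cells before the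
-- current cell (so a fresh char's first row is the current row)
lemma pvStepA (ss pfx rest : List String) (row : String) (pre suf : List Char) (ch : Char)
    (d : PySem.Dict String String)
    (hss : ss = pfx ++ row :: rest) (hrow : row.toList = pre ++ ch :: suf)
    (h : AInv ss (pfx.flatMap String.toList ++ pre) d) :
    AInv ss (pfx.flatMap String.toList ++ (pre ++ [ch])) (AutoCountStepA row d ch) := by
  obtain ⟨h1, h2, h3⟩ := h
  by_cases hch : ch = '-'
  · subst hch
    refine ⟨?_, ?_, ?_⟩
    · simpa [AutoCountStepA, List.filter_append] using h1
    · simpa [AutoCountStepA] using h2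
    · intro c hc
      rw [show AutoCountStepA row d '-' = d from by simp [AutoCountStepA]]
      rw [h3 c hc]
      simp only [List.mem_append, List.mem_singleton]
      tauto
  · have hchb : (ch == '-') = false := by simp [hch]
    have hfilter : (pfx.flatMap String.toList ++ (pre ++ [ch])).filter (fun c => c != '-')
        = (pfx.flatMap String.toList ++ pre).filter (fun c => c != '-') ++ [ch] := by
      simp [List.filter_append, hch]
    by_cases hcont : d.contains (String.ofList [ch]) = true
    -- already classified: A skips
    · have hmem : ch ∈ pfx.flatMap String.toList ++ pre := (h3 ch hch).mp hcont
      have hA : AutoCountStepA row d ch = d := by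
        simp [AutoCountStepA, hchb, hcont]
      rw [hA]
      refine ⟨?_, h2, ?_⟩
      · rw [hfilter, pvDedup_append_mem (List.mem_filter.mpr ⟨hmem, by simp [hch]⟩)]
        exact h1
      · intro c hc
        rw [h3 c hc]
        simp only [List.mem_append, List.mem_singleton] at hmem ⊢
        constructor
        · intro hm
          tauto
        · intro hm
          rcases hm with hm | hm | hm
          · tauto
          · tauto
          · subst hm
            tauto
    -- fresh char: its first row is the current row, and A inserts B's value
    · have hcontf : d.contains (String.ofList [ch]) = false := by
        rw [← Bool.not_eq_true]
        exact hcont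
      have hnotdone : ch ∉ pfx.flatMap String.toList ++ pre := fun hm => hcont ((h3 ch hch).mpr hm)
      -- find? over ss hits exactly 'row'
      have hfind : ss.find? (fun r => PySem.Str.isIn (String.ofList [ch]) r) = some row := by
        rw [hss, List.find?_append]
        have hpfx : pfx.find? (fun r => PySem.Str.isIn (String.ofList [ch]) r) = none := by
          rw [List.find?_eq_none]
          intro r hr
          rw [pvIsIn_singleton]
          simp only [List.contains_eq_mem, decide_eq_true_eq]
          intro hcr
          exact hnotdone (List.mem_append_left _ (List.mem_flatMap.mpr ⟨r, hr, hcr⟩))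
        rw [hpfx, Option.none_or]
        rw [List.find?_cons_of_pos]
        rw [pvIsIn_singleton, hrow]
        simp
      have hchrow : ch ∈ row.toList := by rw [hrow]; simp
      have hcnt1 : 1 ≤ PySem.Str.count row (String.ofList [ch]) := by
        rw [pvStrCount_key, pvCnt]
        have : List.countP (fun c => String.ofList [c] == String.ofList [ch]) row.toList ≠ 0 := by
          rw [Ne, List.countP_eq_zero]
          intro hall
          have hx := hall ch hchrow
          simp at hx
        omega
      have hval : AutoCountStepA row d ch = d.insert (String.ofList [ch]) (pvVal ss ch) := by
        simp only [AutoCountStepA, hchb, Bool.false_eq_true, if_false, hcontf, pvVal, hfind,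
          Option.getD_some]
        by_cases h2c : 2 ≤ PySem.Str.count row (String.ofList [ch])
        · rw [if_pos h2c, if_pos h2c]
        · rw [if_neg h2c, if_neg h2c, if_pos (by omega)]
      rw [hval]
      have hitems := PySem.Dict.items_insert_of_not_contains d (pvVal ss ch) hcontf
      refine ⟨?_, ?_, ?_⟩
      · rw [hitems, hfilter, pvDedup_append_not_mem, List.map_append, h1]
        · simp
        · exact fun hm => hnotdone (List.mem_filter.mp hm).1
      · exact PySem.Dict.nodup_keys_insert d _ _ h2
      · intro c hc
        simp only [PySem.Dict.contains_insert, Bool.or_eq_true, beq_iff_eq,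
          String.ofList_inj, List.cons.injEq, and_true]
        rw [h3 c hc]
        simp only [List.mem_append, List.mem_singleton]
        tauto

lemma pvRowA (ss pfx rest : List String) (row : String) (hss : ss = pfx ++ row :: rest) :
    ∀ (suf pre : List Char) (d : PySem.Dict String String),
      row.toList = pre ++ suf → AInv ss (pfx.flatMap String.toList ++ pre) d →
      AInv ss (pfx.flatMap String.toList ++ (pre ++ suf)) (suf.foldl (AutoCountStepA row) d) := by
  intro suf
  induction suf with
  | nil => intro pre d hs h; simpa using h
  | cons ch suf ih =>
      intro pre d hs h
      have h1 := pvStepA ss pfx rest row pre suf ch d hss hs h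
      have h2 := ih (pre ++ [ch]) _ (by simpa using hs) h1
      simpa using h2

lemma pvOuterA (ss : List String) :
    ∀ (rest pfx : List String) (d : PySem.Dict String String),
      ss = pfx ++ rest → AInv ss (pfx.flatMap String.toList) d →
      AInv ss ((pfx ++ rest).flatMap String.toList)
        (rest.foldl (fun d row => row.toList.foldl (AutoCountStepA row) d) d) := by
  intro rest
  induction rest with
  | nil => intro pfx d hs h; simpa using h
  | cons row rest ih =>
      intro pfx d hs h
      have h1 := pvRowA ss pfx rest row hs row.toList [] d (by simp)
        (by simpa using h)
      have h2 := ih (pfx ++ [row]) _ (by simpa using hs)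
        (by simpa using h1)
      simpa using h2

-- A's pyRange/pyGetD loop is a fold over the rows themselves
lemma pvRangeRows (ss : List String) :
    (List.range ss.length).map (fun k : Nat => PySem.List.pyGetD ss ((0 : Int) + (k : Int)) "") = ss := by
  apply List.ext_getElem (by simp)
  intro i h1 h2
  simp only [List.getElem_map, List.getElem_range, zero_add, PySem.List.pyGetD_natCast]
  simp [List.getD, h2]

-- B's fresh-key fold appends one entry per distinct car char
lemma pvBitems (ss : List String) (cars : List Char) (hnd : cars.Nodup) :
    (cars.foldl (AutoCountStepB ss) PySem.Dict.empty).items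
      = cars.map (fun ch => (String.ofList [ch], pvVal ss ch)) := by
  have hstep : AutoCountStepB ss = fun out c =>
      PySem.Dict.insert out (String.ofList [c]) (pvVal ss c) := by
    funext out c
    simp [AutoCountStepB, pvVal]
  rw [hstep]
  rw [PySem.Dict.items_foldl_insert_fresh]
  · simp [PySem.Dict.empty]
  · intro a _
    simp [PySem.Dict.empty]
  · exact (List.nodup_map_iff (fun a b h => by simpa [String.ofList_inj] using h)).mpr hnd

lemma pvFilterFlatMap (ss : List String) :
    (ss.flatMap String.toList).filter (fun ch => ch != '-')
      = ss.flatMap (fun row => row.toList.filter (fun ch => ch != '-')) := by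
  induction ss with
  | nil => simp
  | cons r t ih => simp [List.flatMap_cons, List.filter_append, ih]

-- ===== VERDICT (by name: the statement is the Claim_ definition above) =====
theorem AutoCount_spec : Claim_equal_AutoCount := by
  intro ss _
  unfold Spec_AutoCount AutoCount AutoCount_alt
  have hbase : AInv ss (List.flatMap String.toList []) PySem.Dict.empty := by
    refine ⟨by simp [PySem.Dict.empty], by simp [PySem.Dict.empty, PySem.Dict.keys], ?_⟩
    intro c _
    simp [PySem.Dict.contains_empty]
  have h := pvOuterA ss ss [] PySem.Dict.empty (by simp) hbase
  have hA : (PySem.List.pyRange 0 (ss.length : Int) 1).foldl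
      (fun CarDict line =>
        (PySem.List.pyGetD ss line "").toList.foldl
          (AutoCountStepA (PySem.List.pyGetD ss line "")) CarDict)
      PySem.Dict.empty
      = ss.foldl (fun d row => row.toList.foldl (AutoCountStepA row) d) PySem.Dict.empty := by
    rw [PySem.List.pyRange_one]
    conv_rhs => rw [← pvRangeRows ss]
    rw [List.foldl_map, List.foldl_map]
    norm_num
  rw [hA]
  rw [(by simpa using h : AInv ss (ss.flatMap String.toList)
        (ss.foldl (fun d row => row.toList.foldl (AutoCountStepA row) d) PySem.Dict.empty)).1]
  rw [pvBitems ss _ (PySem.List.nodup_dedup _), ← pvFilterFlatMap]
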